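-- pv_equiv track=rewrite | github.com/DarkPheonix444/2d-to-3d | core-engine/layout_graph.py | _keep_cyclic_components
-- ===== SOURCE A (Python) =====
-- from typing import Dict, List, Set, Tuple
--
-- Point = Tuple[int, int]
--
-- def _keep_cyclic_components(graph: Dict[Point, List[Point]]) -> Dict[Point, List[Point]]:
--     visited = set()
--     valid_nodes = set()
--
--     def dfs(start):
--         stack = [(start, None)]
--         local_nodes = set()
--         has_cycle = False
--
--         while stack:
--             node, parent = stack.pop()
--
--             if node in local_nodes:
--                 has_cycle = True
--                 continue
--
--             local_nodes.add(node)
--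
--             for nbr in graph[node]:
--                 if nbr == parent:
--                     continue
--                 stack.append((nbr, node))
--
--         return local_nodes, has_cycle
--
--     for node in graph:
--         if node in visited:
--             continue
--
--         comp_nodes, has_cycle = dfs(node)
--         visited |= comp_nodes
--
--         if has_cycle:
--             valid_nodes |= comp_nodes
--
--     # rebuild graph
--     new_graph = {}
--     for node in valid_nodes:
--         new_graph[node] = [nbr for nbr in graph[node] if nbr in valid_nodes]
--
--     return new_graph
-- ===== SOURCE B (Python) =====
-- # B: frame-stack DFS — one stack frame per discovered node with a descending index
-- # pointer into its adjacency list (stack stays O(V) instead of A's O(E) pile of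
-- # (node, parent) pairs); a cycle is flagged when a scanned non-parent neighbour is
-- # already in the component, instead of A's flag on re-popping a node.
-- def _keep_cyclic_components(graph):
--     visited = set()
--     valid_nodes = set()
--
--     def explore(start):
--         comp = {start}
--         has_cycle = False
--         frames = [[start, None, len(graph[start])]]
--
--         while frames:
--             node, parent, i = frames[-1]
--             if i == 0:
--                 frames.pop()
--                 continue
--             frames[-1][2] = i - 1
--             nbr = graph[node][i - 1]
--             if nbr == parent:
--                 continue
--             if nbr in comp:
--                 has_cycle = True
--             else:
--                 comp.add(nbr)
--                 frames.append([nbr, node, len(graph[nbr])])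
--
--         return comp, has_cycle
--
--     for node in graph:
--         if node in visited:
--             continue
--         comp, has_cycle = explore(node)
--         visited |= comp
--         if has_cycle:
--             valid_nodes |= comp
--
--     return {node: [nbr for nbr in graph[node] if nbr in valid_nodes]
--             for node in graph if node in valid_nodes}
-- ===== Notes on version B (the rewrite author's own statement) =====
-- stated objective: alternative
-- what changed: A's DFS pushes every (neighbour, parent) pair onto one big stack (O(E) entries) and flags a cycle when a node is popped a second time; B keeps a stack of per-node frames (node, parent, index pointer into the adjacency list), pushes each node at most once upon discovery, and flags a cycle when a scanned non-parent neighbour is already in the component.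
import Mathlib
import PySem

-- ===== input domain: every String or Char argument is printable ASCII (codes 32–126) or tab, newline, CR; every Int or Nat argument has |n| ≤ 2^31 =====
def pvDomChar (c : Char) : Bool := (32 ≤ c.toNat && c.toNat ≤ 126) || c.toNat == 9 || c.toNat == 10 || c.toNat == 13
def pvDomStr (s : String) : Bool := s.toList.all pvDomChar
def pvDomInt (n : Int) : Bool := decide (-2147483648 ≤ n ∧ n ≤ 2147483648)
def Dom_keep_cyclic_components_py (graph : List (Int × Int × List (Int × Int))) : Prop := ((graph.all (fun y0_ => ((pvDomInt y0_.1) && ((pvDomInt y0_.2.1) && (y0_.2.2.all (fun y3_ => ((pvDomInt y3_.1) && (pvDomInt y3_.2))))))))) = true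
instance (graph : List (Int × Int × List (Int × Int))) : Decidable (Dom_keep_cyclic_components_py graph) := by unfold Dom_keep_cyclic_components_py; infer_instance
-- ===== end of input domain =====

-- B replaces A's push-all stack of (node, parent) pairs with re-pop cycle detection by a
-- frame-stack DFS: one frame per discovered node with a descending index pointer into its
-- adjacency list, flagging a cycle when a scanned non-parent neighbour is already visited.

-- shared graph accessors (both Pythons read the same dict)
def pvKey (e : Int × Int × List (Int × Int)) : Int × Int := (e.1, e.2.1)

def pvKeys (graph : List (Int × Int × List (Int × Int))) : List (Int × Int) := graph.map pvKey

-- graph[u]; Python raises KeyError when u is missing — Pre_ excludes that, the default [] is never read there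
def pvAdj (graph : List (Int × Int × List (Int × Int))) (u : Int × Int) : List (Int × Int) :=
  match graph.find? (fun e => pvKey e == u) with
  | some e => e.2.2
  | none => []

-- fuel: an upper bound on the number of iterations of either while-loop (proved sufficient under Pre_)
def pvFuel (graph : List (Int × Int × List (Int × Int))) : Nat :=
  1 + graph.length + (graph.map (fun e => e.2.2.length)).sum

-- ===== PORT A =====

-- the entries pushed when `node` (popped with `parent`) is first visited:
-- for nbr in graph[node]: if nbr == parent: continue; stack.append((nbr, node))
-- (stack top = list head, so the appended run is reversed)
def pvPushes (graph : List (Int × Int × List (Int × Int))) (node : Int × Int) (parent : Option (Int × Int)) :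
    List ((Int × Int) × Option (Int × Int)) :=
  (((pvAdj graph node).filter (fun nbr => !(some nbr == parent))).map (fun nbr => (nbr, some node))).reverse

-- the while-loop of A's dfs: state = (stack, local_nodes, has_cycle)
def dfsA (graph : List (Int × Int × List (Int × Int))) :
    Nat → List ((Int × Int) × Option (Int × Int)) → PySem.Set (Int × Int) → Bool →
    PySem.Set (Int × Int) × Bool
  | 0, _, loc, fl => (loc, fl)
  | _ + 1, [], loc, fl => (loc, fl)
  | f + 1, (node, parent) :: rest, loc, fl =>
    if PySem.Set.contains loc node then dfsA graph f rest loc true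
    else dfsA graph f (pvPushes graph node parent ++ rest) (PySem.Set.add loc node) fl

def keep_cyclic_components_py (graph : List (Int × Int × List (Int × Int))) : List (Int × Int × List (Int × Int)) :=
  let st := graph.foldl
    (fun (st : PySem.Set (Int × Int) × PySem.Set (Int × Int)) e =>
      let node := pvKey e
      if PySem.Set.contains st.1 node then st
      else
        let r := dfsA graph (pvFuel graph) [(node, none)] PySem.Set.empty false
        (PySem.Set.union st.1 r.1, if r.2 then PySem.Set.union st.2 r.1 else st.2))
    (PySem.Set.empty, PySem.Set.empty)
  -- Python iterates the SET valid_nodes to rebuild the dict; set iteration order is not modelled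
  -- (the output dict is compared order-insensitively), so the rebuild is rendered deterministically
  -- in graph key order (valid_nodes ⊆ keys under Pre_).
  (graph.filter (fun e => PySem.Set.contains st.2 (pvKey e))).map
    (fun e => (e.1, e.2.1, e.2.2.filter (fun nbr => PySem.Set.contains st.2 nbr)))

-- ===== PORT B =====

-- the while-loop of B's explore: state = (frames, comp, has_cycle); a frame
-- [node, parent, i] scans graph[node] downwards from index i-1
def framesB (graph : List (Int × Int × List (Int × Int))) :
    Nat → List ((Int × Int) × Option (Int × Int) × Nat) → PySem.Set (Int × Int) → Bool →
    PySem.Set (Int × Int) × Bool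
  | 0, _, comp, fl => (comp, fl)
  | _ + 1, [], comp, fl => (comp, fl)
  | f + 1, (_node, _parent, 0) :: rest, comp, fl => framesB graph f rest comp fl
  | f + 1, (node, parent, j + 1) :: rest, comp, fl =>
    let nbr := (pvAdj graph node).getD j (0, 0)
    if some nbr == parent then framesB graph f ((node, parent, j) :: rest) comp fl
    else if PySem.Set.contains comp nbr then framesB graph f ((node, parent, j) :: rest) comp true
    else framesB graph f
      ((nbr, some node, (pvAdj graph nbr).length) :: (node, parent, j) :: rest)
      (PySem.Set.add comp nbr) fl

def keep_cyclic_components_py_alt (graph : List (Int × Int × List (Int × Int))) : List (Int × Int × List (Int × Int)) :=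
  let st := graph.foldl
    (fun (st : PySem.Set (Int × Int) × PySem.Set (Int × Int)) e =>
      let node := pvKey e
      if PySem.Set.contains st.1 node then st
      else
        let r := framesB graph (pvFuel graph) [(node, none, (pvAdj graph node).length)]
          (PySem.Set.add PySem.Set.empty node) false
        (PySem.Set.union st.1 r.1, if r.2 then PySem.Set.union st.2 r.1 else st.2))
    (PySem.Set.empty, PySem.Set.empty)
  -- same deterministic rendering of the set-driven dict rebuild as in port A
  (graph.filter (fun e => PySem.Set.contains st.2 (pvKey e))).map
    (fun e => (e.1, e.2.1, e.2.2.filter (fun nbr => PySem.Set.contains st.2 nbr)))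

-- ===== PRECONDITION & SPEC =====
-- Pre_ excludes graphs with a neighbour that is not a key — Python raises KeyError there —
-- and association lists with duplicate keys, which do not represent a Python dict (the dict
-- constructor would collapse them).
def Pre_keep_cyclic_components_py (graph : List (Int × Int × List (Int × Int))) : Prop :=
  (pvKeys graph).Nodup ∧
  (∀ e ∈ graph, ∀ v ∈ e.2.2, v ∈ pvKeys graph)

instance (graph : List (Int × Int × List (Int × Int))) : Decidable (Pre_keep_cyclic_components_py graph) := by
  unfold Pre_keep_cyclic_components_py; infer_instance

def pvWitness_keep_cyclic_components_py : (List (Int × Int × List (Int × Int))) :=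
  [(0, 0, [(1, 1), (2, 2)]), (1, 1, [(0, 0), (2, 2)]), (2, 2, [(0, 0), (1, 1)]), (5, 5, [(6, 6)]), (6, 6, [(5, 5)])]

def Spec_keep_cyclic_components_py (graph : List (Int × Int × List (Int × Int))) (out : List (Int × Int × List (Int × Int))) : Prop := out = keep_cyclic_components_py_alt graph
instance (graph : List (Int × Int × List (Int × Int))) (out : List (Int × Int × List (Int × Int))) : Decidable (Spec_keep_cyclic_components_py graph out) := by unfold Spec_keep_cyclic_components_py; infer_instance

-- ===== CLAIM (what is proved, stated in full; the proofs are below) =====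
def Claim_equal_keep_cyclic_components_py : Prop := ∀ (graph : List (Int × Int × List (Int × Int))), Dom_keep_cyclic_components_py graph → Pre_keep_cyclic_components_py graph → Spec_keep_cyclic_components_py graph (keep_cyclic_components_py graph)

-- ===== LEMMAS AND PROOFS =====

-- ---- basic graph facts ----

theorem pvAdj_of_mem (graph : List (Int × Int × List (Int × Int))) (e : Int × Int × List (Int × Int))
    (hk : (pvKeys graph).Nodup) (he : e ∈ graph) : pvAdj graph (pvKey e) = e.2.2 := by
  induction graph with
  | nil => cases he
  | cons e0 t ih =>
    simp only [pvKeys, List.map_cons, List.nodup_cons] at hk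
    rcases List.mem_cons.1 he with rfl | ht
    · simp [pvAdj]
    · have hne : (pvKey e0 == pvKey e) = false := by
        apply beq_eq_false_iff_ne.2
        intro h
        exact hk.1 (h ▸ List.mem_map_of_mem ht)
      simp only [pvAdj, List.find?]
      rw [hne]
      exact ih hk.2 ht

theorem pv_mem_keys (graph : List (Int × Int × List (Int × Int))) (u : Int × Int) :
    u ∈ pvKeys graph ↔ ∃ e ∈ graph, pvKey e = u := by
  simp [pvKeys, List.mem_map]

theorem pvAdj_subset_keys (graph : List (Int × Int × List (Int × Int)))
    (hk : (pvKeys graph).Nodup) (hc : ∀ e ∈ graph, ∀ v ∈ e.2.2, v ∈ pvKeys graph)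
    (u v : Int × Int) (hu : u ∈ pvKeys graph) (hv : v ∈ pvAdj graph u) : v ∈ pvKeys graph := by
  rcases (pv_mem_keys graph u).1 hu with ⟨e, he, rfl⟩
  rw [pvAdj_of_mem graph e hk he] at hv
  exact hc e he v hv

theorem pv_contains_add_self (loc : PySem.Set (Int × Int)) (x : Int × Int) :
    PySem.Set.contains (PySem.Set.add loc x) x = true :=
  (PySem.Set.contains_iff _ _).2 ((PySem.Set.mem_add _ _ _).2 (Or.inr rfl))

theorem pv_contains_add_ne (loc : PySem.Set (Int × Int)) (x y : Int × Int) (h : y ≠ x) :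
    PySem.Set.contains (PySem.Set.add loc x) y = PySem.Set.contains loc y := by
  rw [Bool.eq_iff_iff, PySem.Set.contains_iff, PySem.Set.contains_iff, PySem.Set.mem_add]
  constructor
  · rintro (hy | rfl)
    · exact hy
    · exact absurd rfl h
  · exact Or.inl

-- ---- potential (fuel accounting) ----

def potInner (graph : List (Int × Int × List (Int × Int))) (loc : PySem.Set (Int × Int)) : Nat :=
  ((graph.filter (fun e => !(PySem.Set.contains loc (pvKey e)))).map (fun e => 1 + e.2.2.length)).sum

theorem potInner_cons (graph : List (Int × Int × List (Int × Int))) (e : Int × Int × List (Int × Int))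
    (loc : PySem.Set (Int × Int)) :
    potInner (e :: graph) loc =
      (if PySem.Set.contains loc (pvKey e) = true then 0 else 1 + e.2.2.length) + potInner graph loc := by
  cases h : PySem.Set.contains loc (pvKey e) with
  | true => simp only [potInner, List.filter_cons, h]; simp
  | false => simp only [potInner, List.filter_cons, h]; simp

theorem potInner_congr (graph : List (Int × Int × List (Int × Int))) (loc : PySem.Set (Int × Int))
    (node : Int × Int) (h : ∀ e ∈ graph, pvKey e ≠ node) :
    potInner graph (PySem.Set.add loc node) = potInner graph loc := by
  induction graph with
  | nil => rfl
  | cons e t ih =>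
    rw [potInner_cons, potInner_cons, pv_contains_add_ne loc node (pvKey e) (h e List.mem_cons_self),
      ih (fun e' he' => h e' (List.mem_cons_of_mem _ he'))]

theorem pot_drop (graph : List (Int × Int × List (Int × Int))) (loc : PySem.Set (Int × Int))
    (node : Int × Int) (hk : (pvKeys graph).Nodup) (hmem : node ∈ pvKeys graph)
    (hnl : PySem.Set.contains loc node = false) :
    potInner graph (PySem.Set.add loc node) + (1 + (pvAdj graph node).length) = potInner graph loc := by
  induction graph with
  | nil => cases hmem
  | cons e t ih =>
    simp only [pvKeys, List.map_cons, List.nodup_cons] at hk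
    rw [potInner_cons, potInner_cons]
    rcases List.mem_cons.1 hmem with heq | ht
    · subst heq
      have hadj : pvAdj (e :: t) (pvKey e) = e.2.2 := by simp [pvAdj]
      have h1 : PySem.Set.contains (PySem.Set.add loc (pvKey e)) (pvKey e) = true :=
        pv_contains_add_self loc (pvKey e)
      have h2 : potInner t (PySem.Set.add loc (pvKey e)) = potInner t loc := by
        apply potInner_congr
        intro e' he' hne
        exact hk.1 (hne ▸ List.mem_map_of_mem he')
      rw [h1, h2, hadj, hnl]
      simp; omega
    · have hne : pvKey e ≠ node := by
        intro h; exact hk.1 (h ▸ (by simpa [pvKeys] using ht))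
      have hadj : pvAdj (e :: t) node = pvAdj t node := by
        simp only [pvAdj, List.find?]
        rw [beq_eq_false_iff_ne.2 hne]
      rw [pv_contains_add_ne loc node (pvKey e) hne, hadj]
      have := ih hk.2 ht
      omega

theorem pot_empty (graph : List (Int × Int × List (Int × Int))) :
    potInner graph PySem.Set.empty + 1 = pvFuel graph := by
  have h : ∀ g : List (Int × Int × List (Int × Int)), potInner g PySem.Set.empty =
      g.length + (g.map (fun e => e.2.2.length)).sum := by
    intro g
    induction g with
    | nil => rfl
    | cons e t ih =>
      rw [potInner_cons, ih]
      have : PySem.Set.contains PySem.Set.empty (pvKey e) = false := rfl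
      rw [this]
      simp; omega
  rw [h, pvFuel]; omega

-- ---- encoding B's frame stack as A's entry stack ----

-- the A-stack entries a frame still stands for: the unscanned prefix of the adjacency
-- list, minus the parent, deepest-scanned-first
def encFrame (graph : List (Int × Int × List (Int × Int)))
    (fr : (Int × Int) × Option (Int × Int) × Nat) : List ((Int × Int) × Option (Int × Int)) :=
  ((((pvAdj graph fr.1).take fr.2.2).filter (fun nbr => !(some nbr == fr.2.1))).map
    (fun nbr => (nbr, some fr.1))).reverse

def encode (graph : List (Int × Int × List (Int × Int)))
    (frames : List ((Int × Int) × Option (Int × Int) × Nat)) :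
    List ((Int × Int) × Option (Int × Int)) :=
  (frames.map (encFrame graph)).flatten

theorem encFrame_full (graph : List (Int × Int × List (Int × Int))) (node : Int × Int)
    (parent : Option (Int × Int)) :
    encFrame graph (node, parent, (pvAdj graph node).length) = pvPushes graph node parent := by
  simp [encFrame, pvPushes]

theorem encFrame_len (graph : List (Int × Int × List (Int × Int)))
    (fr : (Int × Int) × Option (Int × Int) × Nat) :
    (encFrame graph fr).length ≤ fr.2.2 := by
  simp only [encFrame, List.length_reverse, List.length_map]
  calc ((((pvAdj graph fr.1).take fr.2.2).filter (fun nbr => !(some nbr == fr.2.1)))).length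
      ≤ ((pvAdj graph fr.1).take fr.2.2).length := List.length_filter_le _ _
    _ ≤ fr.2.2 := by simp [List.length_take]

theorem encFrame_succ (graph : List (Int × Int × List (Int × Int))) (node : Int × Int)
    (parent : Option (Int × Int)) (j : Nat) (hj : j < (pvAdj graph node).length) :
    encFrame graph (node, parent, j + 1) =
      (if (!(some ((pvAdj graph node).getD j (0, 0)) == parent)) = true
        then [(((pvAdj graph node).getD j (0, 0)), some node)] else []) ++
      encFrame graph (node, parent, j) := by
  have hg : (pvAdj graph node).getD j (0, 0) = (pvAdj graph node)[j] :=
    List.getD_eq_getElem _ _ hj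
  have htake : (pvAdj graph node).take (j + 1) =
      (pvAdj graph node).take j ++ [(pvAdj graph node)[j]] :=
    List.take_succ_eq_append_getElem hj
  rw [hg]
  simp only [encFrame, htake, List.filter_append, List.map_append, List.reverse_append]
  cases h : (!(some ((pvAdj graph node)[j]) == parent)) with
  | true => simp only [List.filter, h, List.map_cons, List.map_nil, List.reverse_cons,
      List.reverse_nil, List.nil_append, if_true]
  | false => simp only [List.filter, h, List.map_nil, List.reverse_nil, List.nil_append,
      Bool.false_eq_true, if_false]

-- ---- the simulation: B's frame machine runs A's stack machine ----

theorem framesB_sim (graph : List (Int × Int × List (Int × Int)))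
    (hk : (pvKeys graph).Nodup) (hc : ∀ e ∈ graph, ∀ v ∈ e.2.2, v ∈ pvKeys graph) :
    ∀ (fB : Nat) (frames : List ((Int × Int) × Option (Int × Int) × Nat))
      (comp : PySem.Set (Int × Int)) (fl : Bool) (fA : Nat),
    (∀ fr ∈ frames, fr.1 ∈ pvKeys graph ∧ fr.2.2 ≤ (pvAdj graph fr.1).length) →
    frames.length + (frames.map (fun fr => fr.2.2)).sum + potInner graph comp ≤ fB →
    (encode graph frames).length + potInner graph comp ≤ fA →
    framesB graph fB frames comp fl = dfsA graph fA (encode graph frames) comp fl := by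
  intro fB
  induction fB with
  | zero =>
    intro frames comp fl fA hfr hB hA
    match frames with
    | [] =>
      have he : encode graph ([] : List ((Int × Int) × Option (Int × Int) × Nat)) = [] := rfl
      rw [he]
      cases fA <;> simp [framesB, dfsA]
    | fr :: rest => simp at hB
  | succ f ih =>
    intro frames comp fl fA hfr hB hA
    match frames with
    | [] =>
      have he : encode graph ([] : List ((Int × Int) × Option (Int × Int) × Nat)) = [] := rfl
      rw [he]
      cases fA <;> simp [framesB, dfsA]
    | (node, parent, 0) :: rest =>
      have he : encode graph ((node, parent, 0) :: rest) = encode graph rest := by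
        simp [encode, encFrame]
      have hstep : framesB graph (f + 1) ((node, parent, 0) :: rest) comp fl =
          framesB graph f rest comp fl := by simp [framesB]
      rw [hstep, he]
      refine ih rest comp fl fA (fun fr h => hfr fr (List.mem_cons_of_mem _ h)) ?_ ?_
      · simp only [List.length_cons, List.map_cons, List.sum_cons] at hB ⊢; omega
      · rw [← he]; exact hA
    | (node, parent, j + 1) :: rest =>
      obtain ⟨hnk, hjl⟩ := hfr _ List.mem_cons_self
      have hj : j < (pvAdj graph node).length := by simpa using hjl
      set nbr := (pvAdj graph node).getD j (0, 0) with hnbr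
      have hfr' : ∀ fr ∈ (node, parent, j) :: rest,
          fr.1 ∈ pvKeys graph ∧ fr.2.2 ≤ (pvAdj graph fr.1).length := by
        intro fr h
        rcases List.mem_cons.1 h with rfl | h
        · exact ⟨hnk, by simp; omega⟩
        · exact hfr fr (List.mem_cons_of_mem _ h)
      have henc := encFrame_succ graph node parent j hj
      by_cases hpar : (some nbr == parent) = true
      · -- parent skip: A's stack is unchanged, B stutters
        have hstep : framesB graph (f + 1) ((node, parent, j + 1) :: rest) comp fl =
            framesB graph f ((node, parent, j) :: rest) comp fl := by
          simp only [framesB, ← hnbr, hpar, if_true]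
        have he : encode graph ((node, parent, j + 1) :: rest) =
            encode graph ((node, parent, j) :: rest) := by
          simp only [encode, List.map_cons, List.flatten_cons, henc]
          rw [← hnbr]
          simp [hpar]
        rw [hstep, he]
        refine ih _ comp fl fA hfr' ?_ ?_
        · simp only [List.length_cons, List.map_cons, List.sum_cons] at hB ⊢; omega
        · rw [← he]; exact hA
      · have hpar' : (!(some nbr == parent)) = true := by simp [hpar]
        have he : encode graph ((node, parent, j + 1) :: rest) =
            (nbr, some node) :: encode graph ((node, parent, j) :: rest) := by
          simp only [encode, List.map_cons, List.flatten_cons, henc]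
          rw [← hnbr]
          simp only [hpar', if_true]
          rfl
        obtain ⟨g, hg⟩ : ∃ g, fA = g + 1 := by
          refine ⟨fA - 1, ?_⟩
          rw [he] at hA
          simp only [List.length_cons] at hA
          omega
        by_cases hdup : PySem.Set.contains comp nbr = true
        · -- already visited: A pops a duplicate, both set the flag
          have hstep : framesB graph (f + 1) ((node, parent, j + 1) :: rest) comp fl =
              framesB graph f ((node, parent, j) :: rest) comp true := by
            simp only [framesB, ← hnbr, hpar, hdup, Bool.false_eq_true, if_false, if_true]
          have hstepA : dfsA graph fA (encode graph ((node, parent, j + 1) :: rest)) comp fl =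
              dfsA graph g (encode graph ((node, parent, j) :: rest)) comp true := by
            rw [he, hg]
            simp only [dfsA, hdup, if_true]
          rw [hstep, hstepA]
          refine ih _ comp true g hfr' ?_ ?_
          · simp only [List.length_cons, List.map_cons, List.sum_cons] at hB ⊢; omega
          · rw [he] at hA
            simp only [List.length_cons] at hA
            omega
        · -- discovery: A pushes nbr's pushes; B opens nbr's frame
          have hdupf : PySem.Set.contains comp nbr = false := by
            cases h' : PySem.Set.contains comp nbr
            · rfl
            · exact absurd h' hdup
          have hnbrmem : nbr ∈ pvAdj graph node := by
            rw [hnbr, List.getD_eq_getElem _ _ hj]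
            exact List.getElem_mem hj
          have hnbrk : nbr ∈ pvKeys graph := pvAdj_subset_keys graph hk hc node nbr hnk hnbrmem
          have hpd := pot_drop graph comp nbr hk hnbrk hdupf
          have hstep : framesB graph (f + 1) ((node, parent, j + 1) :: rest) comp fl =
              framesB graph f
                ((nbr, some node, (pvAdj graph nbr).length) :: (node, parent, j) :: rest)
                (PySem.Set.add comp nbr) fl := by
            simp only [framesB, ← hnbr, hpar, hdupf, Bool.false_eq_true, if_false]
          have he2 : encode graph
              ((nbr, some node, (pvAdj graph nbr).length) :: (node, parent, j) :: rest) =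
              pvPushes graph nbr (some node) ++ encode graph ((node, parent, j) :: rest) := by
            simp only [encode, List.map_cons, List.flatten_cons, encFrame_full]
          have hstepA : dfsA graph fA (encode graph ((node, parent, j + 1) :: rest)) comp fl =
              dfsA graph g
                (encode graph ((nbr, some node, (pvAdj graph nbr).length) :: (node, parent, j) :: rest))
                (PySem.Set.add comp nbr) fl := by
            rw [he, hg, he2]
            simp only [dfsA, hdupf, Bool.false_eq_true, if_false]
          rw [hstep, hstepA]
          have hfr'' : ∀ fr ∈ (nbr, some node, (pvAdj graph nbr).length) :: (node, parent, j) :: rest,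
              fr.1 ∈ pvKeys graph ∧ fr.2.2 ≤ (pvAdj graph fr.1).length := by
            intro fr h
            rcases List.mem_cons.1 h with rfl | h
            · exact ⟨hnbrk, by simp⟩
            · exact hfr' fr h
          have hle2 : (encFrame graph (nbr, some node, (pvAdj graph nbr).length)).length ≤
              (pvAdj graph nbr).length := encFrame_len graph _
          refine ih _ (PySem.Set.add comp nbr) fl g hfr'' ?_ ?_
          · simp only [List.length_cons, List.map_cons, List.sum_cons] at hB ⊢
            omega
          · rw [he2]
            rw [he] at hA
            simp only [List.length_cons, List.length_append] at hA ⊢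
            have : (pvPushes graph nbr (some node)).length ≤ (pvAdj graph nbr).length := by
              rw [← encFrame_full]
              exact encFrame_len graph _
            omega

-- ---- per-start equality and the outer loop ----

theorem perStart_eq (graph : List (Int × Int × List (Int × Int)))
    (hk : (pvKeys graph).Nodup) (hc : ∀ e ∈ graph, ∀ v ∈ e.2.2, v ∈ pvKeys graph)
    (node : Int × Int) (hnode : node ∈ pvKeys graph) :
    dfsA graph (pvFuel graph) [(node, none)] PySem.Set.empty false =
      framesB graph (pvFuel graph) [(node, none, (pvAdj graph node).length)]
        (PySem.Set.add PySem.Set.empty node) false := by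
  have hce : PySem.Set.contains PySem.Set.empty node = false := rfl
  obtain ⟨F, hFe⟩ : ∃ F, pvFuel graph = F + 1 :=
    ⟨graph.length + (graph.map (fun e => e.2.2.length)).sum, by rw [pvFuel]; omega⟩
  have hd := pot_drop graph PySem.Set.empty node hk hnode hce
  have hemp := pot_empty graph
  have h0 : dfsA graph (pvFuel graph) [(node, none)] PySem.Set.empty false =
      dfsA graph F (pvPushes graph node none ++ [])
        (PySem.Set.add PySem.Set.empty node) false := by
    rw [hFe]
    simp only [dfsA, hce, Bool.false_eq_true, if_false]
  have hencinit : encode graph [(node, none, (pvAdj graph node).length)] =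
      pvPushes graph node none ++ [] := by
    simp [encode, encFrame_full]
  have hpl : (pvPushes graph node none).length ≤ (pvAdj graph node).length := by
    rw [← encFrame_full]
    exact encFrame_len graph _
  have hsim := framesB_sim graph hk hc (pvFuel graph)
    [(node, none, (pvAdj graph node).length)] (PySem.Set.add PySem.Set.empty node) false F
    (by
      intro fr h
      rcases List.mem_singleton.1 h with rfl
      exact ⟨hnode, by simp⟩)
    (by simp only [List.length_cons, List.length_nil, List.map_cons, List.map_nil,
          List.sum_cons, List.sum_nil]
        omega)
    (by rw [hencinit]
        simp only [List.length_append, List.length_nil]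
        omega)
  rw [h0, ← hencinit, ← hsim]

theorem keep_spec_aux (graph : List (Int × Int × List (Int × Int)))
    (hp : Pre_keep_cyclic_components_py graph) :
    keep_cyclic_components_py graph = keep_cyclic_components_py_alt graph := by
  obtain ⟨hk, hc⟩ := hp
  have hfold : ∀ (l : List (Int × Int × List (Int × Int))), (∀ e ∈ l, e ∈ graph) →
      ∀ (st : PySem.Set (Int × Int) × PySem.Set (Int × Int)),
      l.foldl (fun (st : PySem.Set (Int × Int) × PySem.Set (Int × Int)) e =>
        let node := pvKey e
        if PySem.Set.contains st.1 node then st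
        else
          let r := dfsA graph (pvFuel graph) [(node, none)] PySem.Set.empty false
          (PySem.Set.union st.1 r.1, if r.2 then PySem.Set.union st.2 r.1 else st.2)) st =
      l.foldl (fun (st : PySem.Set (Int × Int) × PySem.Set (Int × Int)) e =>
        let node := pvKey e
        if PySem.Set.contains st.1 node then st
        else
          let r := framesB graph (pvFuel graph) [(node, none, (pvAdj graph node).length)]
            (PySem.Set.add PySem.Set.empty node) false
          (PySem.Set.union st.1 r.1, if r.2 then PySem.Set.union st.2 r.1 else st.2)) st := by
    intro l
    induction l with
    | nil => intro _ st; rfl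
    | cons e t ih =>
      intro hl st
      simp only [List.foldl_cons]
      rw [perStart_eq graph hk hc (pvKey e) (List.mem_map_of_mem (hl e List.mem_cons_self))]
      exact ih (fun e' he' => hl e' (List.mem_cons_of_mem _ he')) _
  have hA : keep_cyclic_components_py graph =
      (graph.filter (fun e => PySem.Set.contains
          (graph.foldl (fun (st : PySem.Set (Int × Int) × PySem.Set (Int × Int)) e =>
            let node := pvKey e
            if PySem.Set.contains st.1 node then st
            else
              let r := dfsA graph (pvFuel graph) [(node, none)] PySem.Set.empty false
              (PySem.Set.union st.1 r.1, if r.2 then PySem.Set.union st.2 r.1 else st.2))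
            (PySem.Set.empty, PySem.Set.empty)).2 (pvKey e))).map
        (fun e => (e.1, e.2.1, e.2.2.filter (fun nbr => PySem.Set.contains
          (graph.foldl (fun (st : PySem.Set (Int × Int) × PySem.Set (Int × Int)) e =>
            let node := pvKey e
            if PySem.Set.contains st.1 node then st
            else
              let r := dfsA graph (pvFuel graph) [(node, none)] PySem.Set.empty false
              (PySem.Set.union st.1 r.1, if r.2 then PySem.Set.union st.2 r.1 else st.2))
            (PySem.Set.empty, PySem.Set.empty)).2 nbr))) := rfl
  have hB : keep_cyclic_components_py_alt graph =
      (graph.filter (fun e => PySem.Set.contains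
          (graph.foldl (fun (st : PySem.Set (Int × Int) × PySem.Set (Int × Int)) e =>
            let node := pvKey e
            if PySem.Set.contains st.1 node then st
            else
              let r := framesB graph (pvFuel graph) [(node, none, (pvAdj graph node).length)]
                (PySem.Set.add PySem.Set.empty node) false
              (PySem.Set.union st.1 r.1, if r.2 then PySem.Set.union st.2 r.1 else st.2))
            (PySem.Set.empty, PySem.Set.empty)).2 (pvKey e))).map
        (fun e => (e.1, e.2.1, e.2.2.filter (fun nbr => PySem.Set.contains
          (graph.foldl (fun (st : PySem.Set (Int × Int) × PySem.Set (Int × Int)) e =>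
            let node := pvKey e
            if PySem.Set.contains st.1 node then st
            else
              let r := framesB graph (pvFuel graph) [(node, none, (pvAdj graph node).length)]
                (PySem.Set.add PySem.Set.empty node) false
              (PySem.Set.union st.1 r.1, if r.2 then PySem.Set.union st.2 r.1 else st.2))
            (PySem.Set.empty, PySem.Set.empty)).2 nbr))) := rfl
  rw [hA, hB, hfold graph (fun e he => he) (PySem.Set.empty, PySem.Set.empty)]

theorem pv_witness_ok :
    Dom_keep_cyclic_components_py pvWitness_keep_cyclic_components_py ∧
    Pre_keep_cyclic_components_py pvWitness_keep_cyclic_components_py := by decide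

-- ===== VERDICT (by name: the statement is the Claim_ definition above) =====
theorem keep_cyclic_components_py_spec : Claim_equal_keep_cyclic_components_py := by
  intro graph _ hp
  unfold Spec_keep_cyclic_components_py
  exact keep_spec_aux graph hp
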